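-- pv_equiv track=rewrite | github.com/k0nficjusz/some_scripts | v2.py | compare_files
-- ===== SOURCE A (Python) =====
-- def compare_files(source_files, dest_files):
--     """Porównuje pliki na podstawie sum kontrolnych i zwraca różnice."""
--     source_set = set(source_files.keys())
--     dest_set = set(dest_files.keys())
--
--     added = source_set - dest_set
--     deleted = dest_set - source_set
--     modified = {
--         file for file in source_set & dest_set
--         if source_files[file]['checksum'] != dest_files[file]['checksum']
--     }
--
--     return added, deleted, modified
-- ===== SOURCE B (Python) =====
-- def compare_files(source_files, dest_files):
--     """Porównuje pliki na podstawie sum kontrolnych i zwraca różnice."""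
--     # Build a full outer join of the two dicts keyed by file name:
--     # name -> (source entry or None, dest entry or None); then classify each row.
--     status = {}
--     for name, entry in source_files.items():
--         status[name] = (entry, None)
--     for name, entry in dest_files.items():
--         status[name] = (status.get(name, (None, None))[0], entry)
--     added, deleted, modified = set(), set(), set()
--     for name, (s, d) in status.items():
--         if d is None:
--             added.add(name)
--         elif s is None:
--             deleted.add(name)
--         elif s['checksum'] != d['checksum']:
--             modified.add(name)
--     return added, deleted, modified
-- ===== Notes on version B (the rewrite author's own statement) =====
-- stated objective: alternative
-- what changed: Replaced A's set algebra over the two key sets (two set differences, an intersection, a set comprehension) by building a single full-outer-join table name -> (source entry | None, dest entry | None) in two update passes and then classifying each joined row into added/deleted/modified in one pass; no key sets or set operations are used.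
-- outside the precondition, e.g. on compare_files({'a': {}}, {'a': {}}): A raises KeyError, B raises KeyError
import Mathlib
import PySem

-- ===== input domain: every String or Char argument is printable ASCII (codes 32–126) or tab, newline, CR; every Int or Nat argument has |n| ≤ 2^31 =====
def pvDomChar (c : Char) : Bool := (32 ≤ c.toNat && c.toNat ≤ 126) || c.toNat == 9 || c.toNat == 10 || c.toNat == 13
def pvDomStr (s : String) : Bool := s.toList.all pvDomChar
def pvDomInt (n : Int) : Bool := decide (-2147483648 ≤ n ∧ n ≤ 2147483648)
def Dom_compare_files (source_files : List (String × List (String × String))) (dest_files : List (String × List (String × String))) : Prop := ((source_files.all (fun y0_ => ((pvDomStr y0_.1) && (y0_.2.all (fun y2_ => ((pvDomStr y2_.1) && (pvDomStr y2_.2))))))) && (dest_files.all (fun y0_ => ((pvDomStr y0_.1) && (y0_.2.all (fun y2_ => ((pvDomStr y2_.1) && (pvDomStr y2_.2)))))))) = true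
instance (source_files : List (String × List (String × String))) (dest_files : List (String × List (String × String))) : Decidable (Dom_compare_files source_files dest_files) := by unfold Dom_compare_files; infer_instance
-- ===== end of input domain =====

-- B replaces A's set algebra (two key sets, two set differences, an intersection and a set
-- comprehension) by one full-outer-join table name -> (source entry?, dest entry?) built in two
-- update passes and then classified row by row; equal return value on every input admitted by Pre_.

-- entry['checksum'] as a total lookup (Pre_ guarantees the key exists wherever it is consulted)
def pvChk (entry : List (String × String)) : String :=
  (PySem.Dict.ofList entry).getD "checksum" ""

-- ===== PORT A =====
def compare_files (source_files : List (String × List (String × String))) (dest_files : List (String × List (String × String))) : List String × List String × List String :=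
  let src := PySem.Dict.ofList source_files
  let dst := PySem.Dict.ofList dest_files
  let source_set : PySem.Set String := PySem.Set.ofList (PySem.Dict.keys src)
  let dest_set : PySem.Set String := PySem.Set.ofList (PySem.Dict.keys dst)
  let added := PySem.Set.diff source_set dest_set
  let deleted := PySem.Set.diff dest_set source_set
  -- set comprehension over source_set & dest_set (result is a set; order not observed)
  let modified := (PySem.Set.inter source_set dest_set).filter
      (fun f => pvChk (src.getD f []) != pvChk (dst.getD f []))
  (added, deleted, modified)

-- ===== PORT B =====
-- the classification applied to one joined row (the body of Source B's third loop)
def pvClassify (acc : List String × List String × List String)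
    (kv : String × (Option (List (String × String)) × Option (List (String × String)))) :
    List String × List String × List String :=
  match kv.2 with
  | (_, none) => (PySem.Set.add acc.1 kv.1, acc.2.1, acc.2.2)
  | (none, some _) => (acc.1, PySem.Set.add acc.2.1 kv.1, acc.2.2)
  | (some sv, some dv) =>
      if pvChk sv != pvChk dv then (acc.1, acc.2.1, PySem.Set.add acc.2.2 kv.1) else acc

def compare_files_alt (source_files : List (String × List (String × String))) (dest_files : List (String × List (String × String))) : List String × List String × List String :=
  let src := PySem.Dict.ofList source_files
  let dst := PySem.Dict.ofList dest_files
  -- for name, entry in source_files.items(): status[name] = (entry, None)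
  let status1 := src.items.foldl
    (fun (st : PySem.Dict String (Option (List (String × String)) × Option (List (String × String)))) kv =>
      st.insert kv.1 (some kv.2, none)) PySem.Dict.empty
  -- for name, entry in dest_files.items(): status[name] = (status.get(name, (None, None))[0], entry)
  let status := dst.items.foldl
    (fun st kv => st.insert kv.1 ((st.getD kv.1 (none, none)).1, some kv.2)) status1
  -- for name, (s, d) in status.items(): classify
  status.items.foldl pvClassify ([], [], [])

-- ===== PRECONDITION & SPEC =====
-- Pre_ excludes exactly the inputs on which A raises KeyError: some file present in both
-- dicts whose source or dest entry lacks the 'checksum' key.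
def Pre_compare_files (source_files : List (String × List (String × String))) (dest_files : List (String × List (String × String))) : Prop :=
  ∀ f ∈ (PySem.Dict.ofList source_files).keys,
    (PySem.Dict.ofList dest_files).contains f = true →
      (PySem.Dict.ofList ((PySem.Dict.ofList source_files).getD f [])).contains "checksum" = true ∧
      (PySem.Dict.ofList ((PySem.Dict.ofList dest_files).getD f [])).contains "checksum" = true
instance (source_files : List (String × List (String × String))) (dest_files : List (String × List (String × String))) : Decidable (Pre_compare_files source_files dest_files) := by unfold Pre_compare_files; infer_instance

def pvWitness_compare_files : (List (String × List (String × String))) × (List (String × List (String × String))) :=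
  ([("a", [("checksum", "1")]), ("b", [("checksum", "2")])],
   [("a", [("checksum", "9")]), ("c", [("checksum", "3")])])

def Spec_compare_files (source_files : List (String × List (String × String))) (dest_files : List (String × List (String × String))) (out : List String × List String × List String) : Prop := out = compare_files_alt source_files dest_files
instance (source_files : List (String × List (String × String))) (dest_files : List (String × List (String × String))) (out : List String × List String × List String) : Decidable (Spec_compare_files source_files dest_files out) := by unfold Spec_compare_files; infer_instance

-- ===== CLAIM (what is proved, stated in full; the proofs are below) =====
def Claim_equal_compare_files : Prop := ∀ (source_files : List (String × List (String × String))) (dest_files : List (String × List (String × String))), Dom_compare_files source_files dest_files → Pre_compare_files source_files dest_files → Spec_compare_files source_files dest_files (compare_files source_files dest_files)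

-- ===== LEMMAS AND PROOFS =====

-- second-pass effect on one already-present row
def pvMerge (l : List (String × List (String × String)))
    (p : String × (Option (List (String × String)) × Option (List (String × String)))) :
    String × (Option (List (String × String)) × Option (List (String × String))) :=
  (p.1, (p.2.1, match l.find? (fun q => q.1 == p.1) with
                | some q => some q.2
                | none => p.2.2))

-- B's second loop = overwrite the dest slot of present rows + append dest-only rows.
theorem pv_join (l : List (String × List (String × String))) :
    ∀ (st : PySem.Dict String (Option (List (String × String)) × Option (List (String × String)))),
      (l.map (·.1)).Nodup → st.keys.Nodup →
      (l.foldl (fun st kv => st.insert kv.1 ((st.getD kv.1 (none, none)).1, some kv.2)) st).items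
        = st.items.map (pvMerge l)
          ++ (l.filter (fun kv => !(st.contains kv.1))).map
              (fun kv => (kv.1, ((none : Option (List (String × String))), some kv.2))) := by
  induction l with
  | nil =>
    intro st _ _
    rw [show pvMerge [] = id from funext fun p => rfl]
    simp
  | cons kv t ih =>
    intro st hndl hnds
    have hkt : kv.1 ∉ t.map (·.1) := (List.nodup_cons.mp hndl).1
    have hndt : (t.map (·.1)).Nodup := (List.nodup_cons.mp hndl).2
    have hfind_t : t.find? (fun q => q.1 == kv.1) = none := by
      rw [List.find?_eq_none]
      intro q hq hbe
      exact hkt (by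
        have : q.1 = kv.1 := by simpa using hbe
        exact this ▸ List.mem_map_of_mem hq)
    rw [List.foldl_cons]
    by_cases hc : st.contains kv.1 = true
    · -- overwrite in place
      have hmemk : kv.1 ∈ st.keys := (PySem.Dict.contains_iff_mem_keys st kv.1).mp hc
      have hitems := PySem.Dict.items_insert_of_contains st ((st.getD kv.1 (none, none)).1, some kv.2) hc
      have hkeys := PySem.Dict.keys_insert_of_contains st ((st.getD kv.1 (none, none)).1, some kv.2) hc
      rw [ih _ hndt (by rw [hkeys]; exact hnds), hitems, List.map_map]
      have hmap : ∀ p ∈ st.items,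
          (pvMerge t ∘ fun p => if (p.1 == kv.1) = true then (kv.1, ((st.getD kv.1 (none, none)).1, some kv.2)) else p) p
            = pvMerge (kv :: t) p := by
        intro p hp
        by_cases hpk : p.1 = kv.1
        · have hgd : st.getD p.1 (none, none) = p.2 :=
            PySem.Dict.getD_of_mem_items st (by exact hp) hnds (none, none)
          simp [pvMerge, hpk, hfind_t, ← hgd]
        · simp [pvMerge, hpk, show (kv.1 == p.1) = false by simpa using Ne.symm hpk]
      rw [List.map_congr_left hmap]
      have hfilt : t.filter (fun q => !((st.insert kv.1 ((st.getD kv.1 (none, none)).1, some kv.2)).contains q.1))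
          = t.filter (fun q => !(st.contains q.1)) := by
        apply List.filter_congr
        intro q hq
        have hqk : (q.1 == kv.1) = false := by
          by_contra h
          have : q.1 = kv.1 := by simpa using (Bool.of_not_eq_false h)
          exact hkt (this ▸ List.mem_map_of_mem hq)
        rw [PySem.Dict.contains_insert, hqk, Bool.false_or]
      rw [hfilt, List.filter_cons_of_neg (by simp [hc])]
    · -- fresh key: append
      have hc' : st.contains kv.1 = false := by simpa using hc
      have hknot : kv.1 ∉ st.keys := fun h => hc ((PySem.Dict.contains_iff_mem_keys st kv.1).mpr h)
      have hgd : st.getD kv.1 (none, none) = (none, none) :=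
        PySem.Dict.getD_of_not_contains st (none, none) hc'
      have hitems := PySem.Dict.items_insert_of_not_contains st ((st.getD kv.1 (none, none)).1, some kv.2) hc'
      rw [ih _ hndt (PySem.Dict.nodup_keys_insert st kv.1 _ hnds), hitems, hgd, List.map_append]
      have hmap : ∀ p ∈ st.items, pvMerge t p = pvMerge (kv :: t) p := by
        intro p hp
        have hpk : (kv.1 == p.1) = false := by
          by_contra h
          have : kv.1 = p.1 := by simpa using (Bool.of_not_eq_false h)
          exact hknot (this ▸ PySem.Dict.mem_keys_of_mem_items st hp)
        simp [pvMerge, hpk]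
      rw [List.map_congr_left hmap]
      have hfilt : t.filter (fun q => !((st.insert kv.1 ((none : Option (List (String × String))), some kv.2)).contains q.1))
          = t.filter (fun q => !(st.contains q.1)) := by
        apply List.filter_congr
        intro q hq
        have hqk : (q.1 == kv.1) = false := by
          by_contra h
          have : q.1 = kv.1 := by simpa using (Bool.of_not_eq_false h)
          exact hkt (this ▸ List.mem_map_of_mem hq)
        rw [PySem.Dict.contains_insert, hqk, Bool.false_or]
      rw [hfilt, List.filter_cons_of_pos (by simp [hc'])]
      simp [pvMerge, hfind_t]
  done

-- row predicates the classification realises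
def pvAddP (kv : String × (Option (List (String × String)) × Option (List (String × String)))) : Bool :=
  kv.2.2.isNone
def pvDelP (kv : String × (Option (List (String × String)) × Option (List (String × String)))) : Bool :=
  kv.2.1.isNone && kv.2.2.isSome
def pvModP (kv : String × (Option (List (String × String)) × Option (List (String × String)))) : Bool :=
  match kv.2 with
  | (some sv, some dv) => pvChk sv != pvChk dv
  | _ => false

-- B's classification loop is a triple of filters when the row keys are distinct and fresh.
theorem pv_classify (l : List (String × (Option (List (String × String)) × Option (List (String × String))))) :
    ∀ (a d m : List String), (l.map (·.1)).Nodup →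
      (∀ kv ∈ l, kv.1 ∉ a) → (∀ kv ∈ l, kv.1 ∉ d) → (∀ kv ∈ l, kv.1 ∉ m) →
      l.foldl pvClassify (a, d, m)
        = (a ++ (l.filter pvAddP).map (·.1),
           d ++ (l.filter pvDelP).map (·.1),
           m ++ (l.filter pvModP).map (·.1)) := by
  induction l with
  | nil => intro a d m _ _ _ _; simp
  | cons kv t ih =>
    intro a d m hnd ha hd hm
    have hkt : kv.1 ∉ t.map (·.1) := (List.nodup_cons.mp hnd).1
    have hndt : (t.map (·.1)).Nodup := (List.nodup_cons.mp hnd).2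
    have hfresh : ∀ (x : List String), (∀ q ∈ kv :: t, q.1 ∉ x) → ∀ q ∈ t, q.1 ∉ x ++ [kv.1] := by
      intro x hx q hq hmem
      rcases List.mem_append.mp hmem with h | h
      · exact hx q (List.mem_cons_of_mem _ hq) h
      · exact hkt ((List.mem_singleton.mp h) ▸ List.mem_map_of_mem hq)
    have ha' : ∀ q ∈ t, q.1 ∉ a := fun q hq => ha q (List.mem_cons_of_mem _ hq)
    have hd' : ∀ q ∈ t, q.1 ∉ d := fun q hq => hd q (List.mem_cons_of_mem _ hq)
    have hm' : ∀ q ∈ t, q.1 ∉ m := fun q hq => hm q (List.mem_cons_of_mem _ hq)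
    obtain ⟨k, svo, dvo⟩ := kv
    rw [List.foldl_cons]
    rcases svo with _ | sv <;> rcases dvo with _ | dv
    · -- (none, none): added
      show List.foldl pvClassify (PySem.Set.add a k, d, m) t = _
      rw [PySem.Set.add_of_not_mem (ha _ (List.mem_cons_self)),
        ih (a ++ [k]) d m hndt (hfresh a ha) hd' hm']
      simp [pvAddP, pvDelP, pvModP]
    · -- (none, some): deleted
      show List.foldl pvClassify (a, PySem.Set.add d k, m) t = _
      rw [PySem.Set.add_of_not_mem (hd _ (List.mem_cons_self)),
        ih a (d ++ [k]) m hndt ha' (hfresh d hd) hm']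
      simp [pvAddP, pvDelP, pvModP]
    · -- (some, none): added
      show List.foldl pvClassify (PySem.Set.add a k, d, m) t = _
      rw [PySem.Set.add_of_not_mem (ha _ (List.mem_cons_self)),
        ih (a ++ [k]) d m hndt (hfresh a ha) hd' hm']
      simp [pvAddP, pvDelP, pvModP]
    · -- (some, some): modified or unchanged
      by_cases hne : (pvChk sv != pvChk dv) = true
      · show List.foldl pvClassify (pvClassify (a, d, m) (k, some sv, some dv)) t = _
        rw [show pvClassify (a, d, m) (k, some sv, some dv) = (a, d, PySem.Set.add m k) by
            simp [pvClassify, hne],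
          PySem.Set.add_of_not_mem (hm _ (List.mem_cons_self)),
          ih a d (m ++ [k]) hndt ha' hd' (hfresh m hm)]
        simp [pvAddP, pvDelP, pvModP, hne]
      · show List.foldl pvClassify (pvClassify (a, d, m) (k, some sv, some dv)) t = _
        rw [show pvClassify (a, d, m) (k, some sv, some dv) = (a, d, m) by
            simp [pvClassify, hne],
          ih a d m hndt ha' hd' hm']
        simp [pvAddP, pvDelP, pvModP, hne]

-- join-row builders used by the proof
def pvF1 (dst : PySem.Dict String (List (String × String))) (kv : String × List (String × String)) :
    String × (Option (List (String × String)) × Option (List (String × String))) :=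
  (kv.1, (some kv.2, dst.get? kv.1))
def pvG (kv : String × List (String × String)) :
    String × (Option (List (String × String)) × Option (List (String × String))) :=
  (kv.1, (none, some kv.2))

-- Dict membership test equals Set membership test on its key list.
theorem pv_dict_contains_eq_set_contains (d : PySem.Dict String (List (String × String))) (f : String) :
    PySem.Dict.contains d f = PySem.Set.contains (PySem.Dict.keys d) f := by
  simp [PySem.Dict.contains_eq_decide_mem_keys, PySem.Set.contains_eq_listContains]

-- the fully joined table of the two dicts
theorem pv_status_items (s d : List (String × List (String × String))) :
    (((PySem.Dict.ofList d).items).foldl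
        (fun st kv => st.insert kv.1 ((st.getD kv.1 (none, none)).1, some kv.2))
        (((PySem.Dict.ofList s).items).foldl
          (fun st kv => st.insert kv.1 (some kv.2, none)) PySem.Dict.empty)).items
      = ((PySem.Dict.ofList s).items).map (pvF1 (PySem.Dict.ofList d))
        ++ (((PySem.Dict.ofList d).items).filter
              (fun kv => !((PySem.Dict.ofList s).contains kv.1))).map pvG := by
  have hnds : (PySem.Dict.ofList s).keys.Nodup := PySem.Dict.nodup_keys_ofList s
  have hndd : (PySem.Dict.ofList d).keys.Nodup := PySem.Dict.nodup_keys_ofList d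
  have h1 : (((PySem.Dict.ofList s).items).foldl
      (fun (st : PySem.Dict String (Option (List (String × String)) × Option (List (String × String)))) kv =>
        st.insert kv.1 (some kv.2, none)) PySem.Dict.empty).items
      = ((PySem.Dict.ofList s).items).map
          (fun kv => (kv.1, ((some kv.2, none) : Option (List (String × String)) × Option (List (String × String))))) := by
    have hfr := PySem.Dict.items_foldl_insert_fresh (κ := String)
        (ν := Option (List (String × String)) × Option (List (String × String)))
        ((PySem.Dict.ofList s).items) (fun kv => kv.1)
        (fun kv => (some kv.2, none)) PySem.Dict.empty
        (fun a _ => PySem.Dict.contains_empty _) hnds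
    rw [hfr]
    rfl
  have hk1 : (((PySem.Dict.ofList s).items).foldl
      (fun (st : PySem.Dict String (Option (List (String × String)) × Option (List (String × String)))) kv =>
        st.insert kv.1 (some kv.2, none)) PySem.Dict.empty).keys
      = (PySem.Dict.ofList s).keys := by
    show (((PySem.Dict.ofList s).items).foldl
      (fun st kv => st.insert kv.1 (some kv.2, none)) PySem.Dict.empty).items.map (fun x => x.1) = _
    rw [h1, List.map_map]
    rfl
  have hc1 : ∀ x, (((PySem.Dict.ofList s).items).foldl
      (fun (st : PySem.Dict String (Option (List (String × String)) × Option (List (String × String)))) kv =>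
        st.insert kv.1 (some kv.2, none)) PySem.Dict.empty).contains x
      = (PySem.Dict.ofList s).contains x := by
    intro x
    rw [PySem.Dict.contains_eq_decide_mem_keys, PySem.Dict.contains_eq_decide_mem_keys, hk1]
  rw [pv_join ((PySem.Dict.ofList d).items) _ hndd (by rw [hk1]; exact hnds), h1, List.map_map]
  congr 1
  · apply List.map_congr_left
    intro kv _
    show pvMerge ((PySem.Dict.ofList d).items) (kv.1, (some kv.2, none)) = pvF1 (PySem.Dict.ofList d) kv
    cases hf : ((PySem.Dict.ofList d).items).find? (fun q => q.1 == kv.1) with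
    | none => simp [pvMerge, pvF1, PySem.Dict.get?, hf]
    | some q => simp [pvMerge, pvF1, PySem.Dict.get?, hf]
  · congr 1
    apply List.filter_congr
    intro kv _
    rw [hc1]

-- ===== VERDICT (by name: the statement is the Claim_ definition above) =====
theorem compare_files_spec : Claim_equal_compare_files := by
  intro s d _ _
  unfold Spec_compare_files compare_files compare_files_alt
  simp only []
  have hnds : (PySem.Dict.ofList s).keys.Nodup := PySem.Dict.nodup_keys_ofList s
  have hndd : (PySem.Dict.ofList d).keys.Nodup := PySem.Dict.nodup_keys_ofList d
  rw [pv_status_items s d]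
  -- distinct row keys of the joined table
  have hsub : ((((PySem.Dict.ofList d).items).filter
      (fun kv => !((PySem.Dict.ofList s).contains kv.1))).map (fun x => x.1)).Sublist
      (((PySem.Dict.ofList d).items).map (fun x => x.1)) :=
    List.Sublist.map (fun x => x.1)
      (List.filter_sublist (p := fun kv => !((PySem.Dict.ofList s).contains kv.1))
        (l := (PySem.Dict.ofList d).items))
  have hnod2 : (((((PySem.Dict.ofList s).items).map (pvF1 (PySem.Dict.ofList d))
      ++ (((PySem.Dict.ofList d).items).filter
            (fun kv => !((PySem.Dict.ofList s).contains kv.1))).map pvG)).map (fun x => x.1)).Nodup := by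
    rw [List.map_append, List.map_map, List.map_map]
    have h1 : (((PySem.Dict.ofList s).items).map ((fun x => x.1) ∘ pvF1 (PySem.Dict.ofList d)))
        = (PySem.Dict.ofList s).keys := rfl
    have h2 : ((((PySem.Dict.ofList d).items).filter
          (fun kv => !((PySem.Dict.ofList s).contains kv.1))).map ((fun x => x.1) ∘ pvG))
        = (((PySem.Dict.ofList d).items).filter
          (fun kv => !((PySem.Dict.ofList s).contains kv.1))).map (fun x => x.1) := rfl
    rw [h1, h2]
    refine List.Nodup.append hnds (hndd.sublist hsub) ?_
    intro x hx hx2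
    obtain ⟨kv, hkv, rfl⟩ := List.mem_map.mp hx2
    have := List.of_mem_filter hkv
    rw [Bool.not_eq_eq_eq_not, Bool.not_true] at this
    exact (Bool.eq_false_iff.mp this) ((PySem.Dict.contains_iff_mem_keys _ _).mpr hx)
  rw [pv_classify _ [] [] [] hnod2 (by simp) (by simp) (by simp)]
  refine Prod.ext ?_ (Prod.ext ?_ ?_)
  · -- added
    show PySem.Set.diff (PySem.Set.ofList ((PySem.Dict.ofList s).keys))
        (PySem.Set.ofList ((PySem.Dict.ofList d).keys))
      = [] ++ (List.filter pvAddP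
          (((PySem.Dict.ofList s).items).map (pvF1 (PySem.Dict.ofList d)) ++
            (((PySem.Dict.ofList d).items).filter
              (fun kv => !((PySem.Dict.ofList s).contains kv.1))).map pvG)).map (fun x => x.1)
    rw [PySem.Set.ofList_eq_self_of_nodup _ hnds, PySem.Set.ofList_eq_self_of_nodup _ hndd,
        List.filter_append, List.filter_map, List.filter_map]
    have hG : (((PySem.Dict.ofList d).items).filter
        (fun kv => !((PySem.Dict.ofList s).contains kv.1))).filter (pvAddP ∘ pvG) = [] := by
      simp [pvAddP, pvG, Function.comp]
    rw [hG]
    show ((((PySem.Dict.ofList s).items).map (fun x => x.1)).filter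
        (fun x => !(PySem.Set.contains ((PySem.Dict.ofList d).keys) x))) = _
    rw [List.filter_map]
    simp only [List.map_nil, List.append_nil, List.nil_append, List.map_map]
    congr 1
    apply List.filter_congr
    intro kv _
    show (!(PySem.Set.contains ((PySem.Dict.ofList d).keys) kv.1)) = pvAddP (pvF1 (PySem.Dict.ofList d) kv)
    rw [← pv_dict_contains_eq_set_contains, PySem.Dict.contains_eq_isSome_get?]
    cases hf : (PySem.Dict.ofList d).get? kv.1 with
    | none => simp [pvAddP, pvF1, hf]
    | some q => simp [pvAddP, pvF1, hf]
  · -- deleted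
    show PySem.Set.diff (PySem.Set.ofList ((PySem.Dict.ofList d).keys))
        (PySem.Set.ofList ((PySem.Dict.ofList s).keys))
      = [] ++ (List.filter pvDelP
          (((PySem.Dict.ofList s).items).map (pvF1 (PySem.Dict.ofList d)) ++
            (((PySem.Dict.ofList d).items).filter
              (fun kv => !((PySem.Dict.ofList s).contains kv.1))).map pvG)).map (fun x => x.1)
    rw [PySem.Set.ofList_eq_self_of_nodup _ hnds, PySem.Set.ofList_eq_self_of_nodup _ hndd,
        List.filter_append, List.filter_map, List.filter_map]
    have hF : (((PySem.Dict.ofList s).items).filter (pvDelP ∘ pvF1 (PySem.Dict.ofList d))) = [] := by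
      simp [pvDelP, pvF1, Function.comp]
    have hG : (((PySem.Dict.ofList d).items).filter
          (fun kv => !((PySem.Dict.ofList s).contains kv.1))).filter (pvDelP ∘ pvG)
        = (((PySem.Dict.ofList d).items).filter
          (fun kv => !((PySem.Dict.ofList s).contains kv.1))) := by
      apply List.filter_eq_self.mpr
      intro kv _
      simp [pvDelP, pvG, Function.comp]
    rw [hF, hG]
    show ((((PySem.Dict.ofList d).items).map (fun x => x.1)).filter
        (fun x => !(PySem.Set.contains ((PySem.Dict.ofList s).keys) x))) = _
    rw [List.filter_map]
    simp only [List.map_nil, List.nil_append, List.map_map]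
    have hmg : ((((PySem.Dict.ofList d).items).filter
          (fun kv => !((PySem.Dict.ofList s).contains kv.1))).map ((fun x => x.1) ∘ pvG))
        = (((PySem.Dict.ofList d).items).filter
          (fun kv => !((PySem.Dict.ofList s).contains kv.1))).map (fun x => x.1) := rfl
    rw [hmg]
    congr 1
    apply List.filter_congr
    intro kv _
    show ((fun x => !(PySem.Set.contains ((PySem.Dict.ofList s).keys) x)) ∘ (fun x => x.1)) kv
        = (!((PySem.Dict.ofList s).contains kv.1))
    show (!(PySem.Set.contains ((PySem.Dict.ofList s).keys) kv.1))
        = (!((PySem.Dict.ofList s).contains kv.1))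
    rw [← pv_dict_contains_eq_set_contains]
  · -- modified
    show ((PySem.Set.inter (PySem.Set.ofList ((PySem.Dict.ofList s).keys))
        (PySem.Set.ofList ((PySem.Dict.ofList d).keys))).filter
          (fun f => pvChk ((PySem.Dict.ofList s).getD f []) != pvChk ((PySem.Dict.ofList d).getD f [])))
      = [] ++ (List.filter pvModP
          (((PySem.Dict.ofList s).items).map (pvF1 (PySem.Dict.ofList d)) ++
            (((PySem.Dict.ofList d).items).filter
              (fun kv => !((PySem.Dict.ofList s).contains kv.1))).map pvG)).map (fun x => x.1)
    rw [PySem.Set.ofList_eq_self_of_nodup _ hnds, PySem.Set.ofList_eq_self_of_nodup _ hndd,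
        List.filter_append, List.filter_map, List.filter_map]
    have hG : (((PySem.Dict.ofList d).items).filter
        (fun kv => !((PySem.Dict.ofList s).contains kv.1))).filter (pvModP ∘ pvG) = [] := by
      simp [pvModP, pvG, Function.comp]
    rw [hG]
    show ((((PySem.Dict.ofList s).items).map (fun x => x.1)).filter
        (fun x => PySem.Set.contains ((PySem.Dict.ofList d).keys) x)).filter
          (fun f => pvChk ((PySem.Dict.ofList s).getD f []) != pvChk ((PySem.Dict.ofList d).getD f [])) = _
    rw [List.filter_map, List.filter_map, List.filter_filter]
    simp only [List.map_nil, List.append_nil, List.map_map]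
    congr 1
    apply List.filter_congr
    intro kv hkv
    show ((pvChk ((PySem.Dict.ofList s).getD kv.1 []) != pvChk ((PySem.Dict.ofList d).getD kv.1 []))
        && PySem.Set.contains ((PySem.Dict.ofList d).keys) kv.1)
      = pvModP (pvF1 (PySem.Dict.ofList d) kv)
    rw [← pv_dict_contains_eq_set_contains, PySem.Dict.contains_eq_isSome_get?]
    have hs : (PySem.Dict.ofList s).getD kv.1 [] = kv.2 :=
      PySem.Dict.getD_of_mem_items _ hkv hnds []
    cases hf : (PySem.Dict.ofList d).get? kv.1 with
    | none => simp [pvModP, pvF1, hf]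
    | some dv =>
      have hd : (PySem.Dict.ofList d).getD kv.1 [] = dv := by
        rw [PySem.Dict.getD_eq_get?_getD, hf]; rfl
      simp [pvModP, pvF1, hf, hs, hd]
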